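-- pv_equiv track=rewrite | github.com/XianghuiMeng-1020/human-machine-difficulty-kit | code/runner.py | build_old2new_map
-- ===== SOURCE A (Python) =====
-- LETTER_SET = ("A", "B", "C", "D")
--
-- def build_old2new_map(options_orig: dict, options_perm: dict) -> dict:
--     """
--     Map original letter -> displayed letter after permutation via text matching.
--     This is robust to how options_perm was built (by content instead of letter).
--     """
--     txt2new = {txt: L for L, txt in options_perm.items()}
--     old2new = {}
--     for old in LETTER_SET:
--         txt = options_orig.get(old)
--         if txt in txt2new:
--             old2new[old] = txt2new[txt]
--     return old2new
-- ===== SOURCE B (Python) =====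
-- LETTER_SET = ("A", "B", "C", "D")
--
-- def build_old2new_map(options_orig: dict, options_perm: dict) -> dict:
--     """
--     Map original letter -> displayed letter after permutation via text matching,
--     with the loop nesting inverted: one pass over options_perm (no reverse text
--     index), marking for each permuted option every original letter whose text
--     equals it (later entries overwrite, so the last match wins as in A), then
--     emitting the found pairs in LETTER_SET order.
--     """
--     found = {}
--     for L, txt in options_perm.items():
--         for old in LETTER_SET:
--             if options_orig.get(old) == txt:
--                 found[old] = L
--     return {old: found[old] for old in LETTER_SET if old in found}
-- ===== Notes on version B (the rewrite author's own statement) =====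
-- stated objective: alternative
-- what changed: B inverts the traversal: instead of building a reverse text->letter index and looking each original letter up in it, B makes a single outer pass over options_perm and for each permuted entry marks every original letter whose text matches (overwriting so the last match wins), then emits the collected pairs in LETTER_SET order.
import Mathlib
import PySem

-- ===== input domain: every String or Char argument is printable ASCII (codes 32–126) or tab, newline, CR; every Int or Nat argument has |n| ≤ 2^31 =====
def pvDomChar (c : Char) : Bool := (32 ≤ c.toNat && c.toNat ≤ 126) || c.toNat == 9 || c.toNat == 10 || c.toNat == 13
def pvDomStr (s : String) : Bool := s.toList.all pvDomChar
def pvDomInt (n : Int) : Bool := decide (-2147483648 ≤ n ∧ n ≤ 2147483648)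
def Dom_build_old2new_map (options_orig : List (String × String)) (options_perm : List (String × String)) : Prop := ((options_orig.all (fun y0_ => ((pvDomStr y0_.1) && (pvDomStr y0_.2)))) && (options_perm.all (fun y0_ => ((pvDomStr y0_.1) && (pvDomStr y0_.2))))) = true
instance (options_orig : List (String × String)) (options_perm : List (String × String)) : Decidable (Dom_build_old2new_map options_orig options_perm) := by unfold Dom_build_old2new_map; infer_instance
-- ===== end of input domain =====

-- B inverts the traversal: one outer pass over options_perm marking matching original letters (last match wins), then emission in LETTER_SET order — no reverse text index (alternative decomposition, similar cost).


-- ===== PORT A =====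
-- loop body of A: txt = options_orig.get(old); if txt in txt2new: old2new[old] = txt2new[txt]
def stepA (options_orig : List (String × String)) (txt2new : PySem.Dict String String)
    (d : PySem.Dict String String) (old : String) : PySem.Dict String String :=
  match (PySem.Dict.mk options_orig).get? old with
  | none => d   -- txt = None, never a key of txt2new
  | some txt => if txt2new.contains txt then d.insert old (txt2new.getD txt "") else d

def build_old2new_map (options_orig : List (String × String)) (options_perm : List (String × String)) : List (String × String) :=
  -- txt2new = {txt: L for L, txt in options_perm.items()}
  let txt2new : PySem.Dict String String :=
    options_perm.foldl (fun d p => d.insert p.2 p.1) PySem.Dict.empty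
  (["A", "B", "C", "D"].foldl (stepA options_orig txt2new) PySem.Dict.empty).items

-- ===== PORT B =====
-- inner loop body of B: if options_orig.get(old) == txt: found[old] = L
def markB (orig : PySem.Dict String String) (txt L : String)
    (f : PySem.Dict String String) (old : String) : PySem.Dict String String :=
  if orig.get? old == some txt then f.insert old L else f

-- final dict comprehension of B: {old: found[old] for old in LETTER_SET if old in found}
def emitB (found : PySem.Dict String String)
    (d : PySem.Dict String String) (old : String) : PySem.Dict String String :=
  match found.get? old with
  | some L => d.insert old L
  | none => d

def build_old2new_map_alt (options_orig : List (String × String)) (options_perm : List (String × String)) : List (String × String) :=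
  let orig := PySem.Dict.mk options_orig
  -- for L, txt in options_perm.items(): for old in LETTER_SET: if orig.get(old) == txt: found[old] = L
  let found : PySem.Dict String String :=
    options_perm.foldl (fun f p => ["A", "B", "C", "D"].foldl (markB orig p.2 p.1) f) PySem.Dict.empty
  (["A", "B", "C", "D"].foldl (emitB found) PySem.Dict.empty).items

-- ===== PRECONDITION & SPEC =====
def Spec_build_old2new_map (options_orig : List (String × String)) (options_perm : List (String × String)) (out : List (String × String)) : Prop := out = build_old2new_map_alt options_orig options_perm
instance (options_orig : List (String × String)) (options_perm : List (String × String)) (out : List (String × String)) : Decidable (Spec_build_old2new_map options_orig options_perm out) := by unfold Spec_build_old2new_map; infer_instance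

-- ===== CLAIM =====
def Claim_equal_build_old2new_map : Prop := ∀ (options_orig : List (String × String)) (options_perm : List (String × String)), Dom_build_old2new_map options_orig options_perm → Spec_build_old2new_map options_orig options_perm (build_old2new_map options_orig options_perm)

-- ===== LEMMAS AND PROOFS =====

/-- What B's inner loop over the letters does to the lookup of a single letter. -/
lemma get?_foldl_markB (orig : PySem.Dict String String) (txt L : String)
    (letters : List String) (f : PySem.Dict String String) (old : String) :
    (letters.foldl (markB orig txt L) f).get? old
      = if old ∈ letters ∧ orig.get? old = some txt then some L else f.get? old := by
  induction letters generalizing f with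
  | nil => simp
  | cons a rest ih =>
    simp only [List.foldl_cons, ih, markB, List.mem_cons]
    by_cases hc : orig.get? old = some txt
    · by_cases hoa : old = a
      · subst hoa
        simp [hc]
      · by_cases ha : orig.get? a = some txt
        · simp [ha, PySem.Dict.get?_insert, hoa, hc]
        · simp [ha, hc, hoa]
    · by_cases ha : orig.get? a = some txt
      · have hoa : old ≠ a := fun h => hc (h ▸ ha)
        simp [ha, PySem.Dict.get?_insert, hc, hoa]
      · simp [ha, hc]

/-- B's found-map lookup equals a last-match scan over options_perm. -/
lemma get?_found_eq_scan (orig : PySem.Dict String String)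
    (op : List (String × String)) (letters : List String)
    (f : PySem.Dict String String) (old : String) :
    (op.foldl (fun f p => letters.foldl (markB orig p.2 p.1) f) f).get? old
      = op.foldl (fun acc p => if old ∈ letters ∧ orig.get? old = some p.2 then some p.1 else acc)
          (f.get? old) := by
  induction op generalizing f with
  | nil => rfl
  | cons p rest ih =>
    simp only [List.foldl_cons, ih, get?_foldl_markB]

/-- Looking up `txt` in the reverse index built by A equals a last-match scan. -/
lemma get?_revIndex_eq_scan (op : List (String × String)) (d : PySem.Dict String String) (txt : String) :
    (op.foldl (fun d p => d.insert p.2 p.1) d).get? txt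
      = op.foldl (fun acc p => if p.2 == txt then some p.1 else acc) (d.get? txt) := by
  induction op generalizing d with
  | nil => rfl
  | cons p rest ih =>
    simp only [List.foldl_cons]
    rw [ih]
    congr 1
    rw [PySem.Dict.get?_insert]
    by_cases h : txt = p.2
    · simp [h]
    · simp [h, Ne.symm h]

/-- The per-letter loop bodies agree for letters drawn from the letter set. -/
lemma stepA_eq_emitB (options_orig options_perm : List (String × String))
    (d : PySem.Dict String String) (old : String)
    (hmem : old ∈ ["A", "B", "C", "D"]) :
    stepA options_orig (options_perm.foldl (fun d p => d.insert p.2 p.1) PySem.Dict.empty) d old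
      = emitB (options_perm.foldl
          (fun f p => ["A", "B", "C", "D"].foldl (markB (PySem.Dict.mk options_orig) p.2 p.1) f)
          PySem.Dict.empty) d old := by
  unfold stepA emitB
  rw [get?_found_eq_scan, PySem.Dict.get?_empty]
  cases hg : (PySem.Dict.mk options_orig).get? old with
  | none =>
    have hnone : options_perm.foldl
        (fun acc p => if old ∈ ["A", "B", "C", "D"] ∧ (none : Option String) = some p.2 then some p.1 else acc)
        (none : Option String) = none := by
      induction options_perm with
      | nil => rfl
      | cons p rest ih => simpa using ih
    simp only [hnone]
  | some txt =>
    simp only [hg]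
    rw [PySem.Dict.contains_eq_isSome_get?, PySem.Dict.getD_eq_get?_getD,
        get?_revIndex_eq_scan options_perm PySem.Dict.empty txt, PySem.Dict.get?_empty]
    have hscan : options_perm.foldl
        (fun acc p => if old ∈ ["A", "B", "C", "D"] ∧ (some txt : Option String) = some p.2 then some p.1 else acc)
        (none : Option String)
      = options_perm.foldl (fun acc p => if p.2 == txt then some p.1 else acc) (none : Option String) := by
      apply PySem.List.foldl_congr_mem
      intro acc p _
      by_cases h : p.2 = txt
      · simp [h, hmem]
      · have hne : ¬ ((some txt : Option String) = some p.2) := by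
          simp only [Option.some.injEq]
          exact fun he => h he.symm
        simp [h, hne]
    rw [hscan]
    cases options_perm.foldl (fun acc p => if p.2 == txt then some p.1 else acc) (none : Option String) with
    | none => rfl
    | some L => rfl

-- ===== VERDICT =====
theorem build_old2new_map_spec : Claim_equal_build_old2new_map := by
  intro options_orig options_perm _
  simp only [Spec_build_old2new_map, build_old2new_map, build_old2new_map_alt]
  congr 1
  apply PySem.List.foldl_congr_mem
  intro d old hmem
  exact stepA_eq_emitB options_orig options_perm d old hmem
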